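-- pv_equiv track=rewrite | github.com/antoinenguyen27/agentUQ | src/uq_runtime/analysis/segmentation.py | _strip_span
-- ===== SOURCE A (Python) =====
-- def _strip_span(text: str, span: tuple[int, int]) -> tuple[str, tuple[int, int]]:
--     start = 0
--     end = len(text)
--     while start < end and text[start].isspace():
--         start += 1
--     while end > start and text[end - 1].isspace():
--         end -= 1
--     return text[start:end], (span[0] + start, span[0] + end)
-- ===== SOURCE B (Python) =====
-- def _strip_span(text: str, span: tuple[int, int]) -> tuple[str, tuple[int, int]]:
--     first = None
--     last = None
--     for i, c in enumerate(text):
--         if not c.isspace():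
--             if first is None:
--                 first = i
--             last = i
--     if first is None:
--         n = len(text)
--         return "", (span[0] + n, span[0] + n)
--     return text[first:last + 1], (span[0] + first, span[0] + last + 1)
-- ===== Notes on version B (the rewrite author's own statement) =====
-- stated objective: alternative
-- what changed: B makes one forward pass over all characters recording the first and last non-whitespace indices in accumulators, instead of A's two opposite-direction pointer scans that stop at the first non-space character.
import Mathlib
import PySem

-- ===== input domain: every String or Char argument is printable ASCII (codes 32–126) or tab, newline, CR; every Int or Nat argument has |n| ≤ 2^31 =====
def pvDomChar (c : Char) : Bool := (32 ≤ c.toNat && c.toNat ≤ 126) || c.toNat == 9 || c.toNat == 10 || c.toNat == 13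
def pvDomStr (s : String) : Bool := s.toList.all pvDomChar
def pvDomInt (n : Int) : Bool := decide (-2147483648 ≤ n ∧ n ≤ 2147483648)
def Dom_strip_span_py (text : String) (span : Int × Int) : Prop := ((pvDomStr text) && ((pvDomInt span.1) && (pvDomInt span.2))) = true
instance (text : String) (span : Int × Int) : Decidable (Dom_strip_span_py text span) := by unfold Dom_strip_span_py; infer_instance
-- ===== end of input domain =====

-- B replaces A's two opposite-direction pointer scans with a single forward pass over all
-- characters that accumulates the first and last non-whitespace indices (alternative; same cost).
set_option maxHeartbeats 1000000


-- ===== PORT A =====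
-- 'while start < end and text[start].isspace(): start += 1'  (the 'start < stop' guard
-- keeps the index in range, so text[start] never raises)
def pvLoopStart (cs : List Char) (stop : Nat) (start : Nat) : Nat :=
  if start < stop ∧ (PySem.List.pyGet? cs (start : Int)).elim false PySem.Chars.isspace then
    pvLoopStart cs stop (start + 1)
  else start
termination_by stop - start
decreasing_by omega

-- 'while end > start and text[end - 1].isspace(): end -= 1'
def pvLoopEnd (cs : List Char) (start : Nat) (e : Nat) : Nat :=
  if e > start ∧ (PySem.List.pyGet? cs ((e : Int) - 1)).elim false PySem.Chars.isspace then
    pvLoopEnd cs start (e - 1)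
  else e
termination_by e
decreasing_by omega

-- 'start' after A's first while-loop (end is still len(text) there)
def pvStartA (text : String) : Nat := pvLoopStart text.toList text.toList.length 0

def pvEndA (text : String) : Nat := pvLoopEnd text.toList (pvStartA text) text.toList.length

def strip_span_py (text : String) (span : Int × Int) : String × (Int × Int) :=
  (PySem.Str.slice text (some ((pvStartA text : Int))) (some ((pvEndA text : Int))),
   (span.1 + (pvStartA text : Int), span.1 + (pvEndA text : Int)))

-- ===== PORT B =====
-- 'for i, c in enumerate(text): if not c.isspace(): (first = i if None); last = i'
def pvScanB (cs : List Char) (i : Nat) (st : Option Nat × Option Nat) : Option Nat × Option Nat :=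
  match cs with
  | [] => st
  | c :: rest =>
    if PySem.Chars.isspace c then pvScanB rest (i + 1) st
    else pvScanB rest (i + 1) (some (st.1.getD i), some i)

def strip_span_py_alt (text : String) (span : Int × Int) : String × (Int × Int) :=
  match pvScanB text.toList 0 (none, none) with
  | (some f, some l) =>
      (PySem.Str.slice text (some (f : Int)) (some ((l : Int) + 1)),
       (span.1 + (f : Int), span.1 + (l : Int) + 1))
  | _ =>  -- 'if first is None' branch (last is None exactly when first is)
      ("", (span.1 + (text.toList.length : Int), span.1 + (text.toList.length : Int)))

-- ===== PRECONDITION & SPEC =====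
def Spec_strip_span_py (text : String) (span : Int × Int) (out : String × (Int × Int)) : Prop := out = strip_span_py_alt text span
instance (text : String) (span : Int × Int) (out : String × (Int × Int)) : Decidable (Spec_strip_span_py text span out) := by unfold Spec_strip_span_py; infer_instance

-- ===== CLAIM (what is proved, stated in full; the proofs are below) =====
def Claim_equal_strip_span_py : Prop := ∀ (text : String) (span : Int × Int), Dom_strip_span_py text span → Spec_strip_span_py text span (strip_span_py text span)

-- ===== LEMMAS AND PROOFS =====

theorem pvLoopStart_eq (cs : List Char) (k : Nat) :
    pvLoopStart cs cs.length k = k + ((cs.drop k).takeWhile PySem.Chars.isspace).length := by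
  rw [pvLoopStart]
  by_cases hk : k < cs.length
  · have hget : PySem.List.pyGet? cs (k : Int) = some cs[k] := by
      simp [PySem.List.pyGet?_natCast, List.getElem?_eq_getElem hk]
    by_cases hp : PySem.Chars.isspace cs[k] = true
    · rw [if_pos ⟨hk, by rw [hget]; exact hp⟩, pvLoopStart_eq cs (k+1)]
      rw [List.drop_eq_getElem_cons hk, List.takeWhile_cons, if_pos hp, List.length_cons]
      omega
    · rw [if_neg (by rw [hget]; simp [hp])]
      rw [List.drop_eq_getElem_cons hk, List.takeWhile_cons, if_neg (by simp [hp]),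
        List.length_nil]
      omega
  · rw [if_neg (by omega)]
    rw [List.drop_eq_nil_iff.mpr (by omega)]
    simp
termination_by cs.length - k
decreasing_by omega

theorem pvLoopEnd_eq (cs : List Char) (s : Nat) (e : Nat) (he : e ≤ cs.length) (hse : s ≤ e) :
    pvLoopEnd cs s e = max s (e - (((cs.take e).reverse.takeWhile PySem.Chars.isspace).length)) := by
  rw [pvLoopEnd]
  by_cases hs : e > s
  · have h1 : e - 1 < cs.length := by omega
    have hget : PySem.List.pyGet? cs ((e : Int) - 1) = some cs[e-1] := by
      have h2 : (e : Int) - 1 = ((e - 1 : Nat) : Int) := by omega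
      rw [h2]
      simp [PySem.List.pyGet?_natCast, List.getElem?_eq_getElem h1]
    have htake : cs.take e = cs.take (e-1) ++ [cs[e-1]] := by
      have h2 : e = (e-1) + 1 := by omega
      conv_lhs => rw [h2]
      rw [List.take_add_one]
      simp [List.getElem?_eq_getElem h1]
    have hrev : (cs.take e).reverse = cs[e-1] :: (cs.take (e-1)).reverse := by
      rw [htake]; simp
    by_cases hp : PySem.Chars.isspace cs[e-1] = true
    · rw [if_pos ⟨hs, by rw [hget]; exact hp⟩,
        pvLoopEnd_eq cs s (e-1) (by omega) (by omega),
        hrev, List.takeWhile_cons, if_pos hp, List.length_cons]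
      omega
    · rw [if_neg (by rw [hget]; simp [hp]),
        hrev, List.takeWhile_cons, if_neg (by simp [hp]), List.length_nil]
      omega
  · rw [if_neg (by omega)]
    omega
termination_by e
decreasing_by omega

-- whitespace-run helper facts shared by the B-side lemmas and the main proof
theorem pvAllRevTakeWhile (l : List Char) (h : l.all PySem.Chars.isspace = true) :
    l.reverse.takeWhile PySem.Chars.isspace = l.reverse := by
  apply List.takeWhile_eq_self_iff.mpr
  intro x hx
  exact (List.all_eq_true.mp h) x (List.mem_reverse.mp hx)

theorem pvNotAllRevLt (l : List Char) (h : l.all PySem.Chars.isspace = false) :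
    (l.reverse.takeWhile PySem.Chars.isspace).length < l.length := by
  have hle : (l.reverse.takeWhile PySem.Chars.isspace).length ≤ l.length := by
    simpa using (List.takeWhile_prefix (l := l.reverse) PySem.Chars.isspace).length_le
  refine lt_of_le_of_ne hle ?_
  intro heq
  have hfull : l.reverse.takeWhile PySem.Chars.isspace = l.reverse :=
    List.IsPrefix.eq_of_length (List.takeWhile_prefix _) (by simpa using heq)
  have hall : ∀ x ∈ l, PySem.Chars.isspace x = true := fun x hx =>
    List.mem_takeWhile_imp (hfull ▸ List.mem_reverse.mpr hx)
  rw [List.all_eq_true.mpr hall] at h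
  exact absurd h (by simp)

-- B's accumulated 'last' index, characterised by the trailing-whitespace run length
theorem pvScanB_snd (cs : List Char) (i : Nat) (f l : Option Nat) :
    (pvScanB cs i (f, l)).2 =
      if cs.all PySem.Chars.isspace then l
      else some (i + cs.length - 1 - ((cs.reverse.takeWhile PySem.Chars.isspace).length)) := by
  induction cs generalizing i f l with
  | nil => simp [pvScanB]
  | cons c rest ih =>
    by_cases hc : PySem.Chars.isspace c = true
    · rw [pvScanB, if_pos hc, ih]
      by_cases hall : rest.all PySem.Chars.isspace = true
      · simp [hall, hc]
      · have hall2 : rest.all PySem.Chars.isspace = false := eq_false_of_ne_true hall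
        have hlt := pvNotAllRevLt rest hall2
        have htk : (rest.reverse ++ [c]).takeWhile PySem.Chars.isspace
            = rest.reverse.takeWhile PySem.Chars.isspace := by
          rw [List.takeWhile_append, if_neg (by simp; omega)]
        simp only [List.reverse_cons, htk, hall2, List.all_cons, hc, Bool.true_and,
          if_neg (by simp : ¬(false = true)), List.length_cons]
        congr 1
        omega
    · rw [pvScanB, if_neg hc, ih]
      have hc2 : PySem.Chars.isspace c = false := eq_false_of_ne_true hc
      simp only [List.reverse_cons, List.all_cons, hc2, Bool.false_and,
        if_neg (by simp : ¬(false = true)), List.length_cons]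
      by_cases hall : rest.all PySem.Chars.isspace = true
      · have heq := pvAllRevTakeWhile rest hall
        have htk : (rest.reverse ++ [c]).takeWhile PySem.Chars.isspace = rest.reverse := by
          rw [List.takeWhile_append, if_pos (by rw [heq])]
          simp [hc2]
        simp only [if_pos hall, htk, List.length_reverse]
        congr 1
        omega
      · have hall2 : rest.all PySem.Chars.isspace = false := eq_false_of_ne_true hall
        have hlt := pvNotAllRevLt rest hall2
        have htk : (rest.reverse ++ [c]).takeWhile PySem.Chars.isspace
            = rest.reverse.takeWhile PySem.Chars.isspace := by
          rw [List.takeWhile_append, if_neg (by simp; omega)]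
        simp only [if_neg hall, htk]
        congr 1
        omega

-- B's accumulated 'first' index: once set it never changes …
theorem pvScanB_fst_some (cs : List Char) (i v : Nat) (l : Option Nat) :
    (pvScanB cs i (some v, l)).1 = some v := by
  induction cs generalizing i l with
  | nil => simp [pvScanB]
  | cons c rest ih =>
    by_cases hc : PySem.Chars.isspace c = true
    · rw [pvScanB, if_pos hc]; exact ih _ _
    · rw [pvScanB, if_neg hc]; simpa using ih _ _

-- … and starting unset it becomes the leading-whitespace run length
theorem pvScanB_fst_none (cs : List Char) (i : Nat) (l : Option Nat) :
    (pvScanB cs i (none, l)).1 =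
      if cs.all PySem.Chars.isspace then none
      else some (i + (cs.takeWhile PySem.Chars.isspace).length) := by
  induction cs generalizing i l with
  | nil => simp [pvScanB]
  | cons c rest ih =>
    by_cases hc : PySem.Chars.isspace c = true
    · rw [pvScanB, if_pos hc, ih]
      by_cases hall : rest.all PySem.Chars.isspace = true
      · simp [hall, hc]
      · rw [if_neg hall, if_neg (by simp [hall])]
        simp [hc]
        omega
    · rw [pvScanB, if_neg hc]
      simp only [Option.getD_none]
      rw [pvScanB_fst_some]
      rw [if_neg (by simp [hc]), List.takeWhile_cons, if_neg (by simp [hc])]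
      simp

theorem strip_span_main (text : String) (span : Int × Int) :
    strip_span_py text span = strip_span_py_alt text span := by
  unfold strip_span_py strip_span_py_alt pvEndA pvStartA
  set cs := text.toList with hcs
  have hslen : (cs.takeWhile PySem.Chars.isspace).length + (cs.dropWhile PySem.Chars.isspace).length = cs.length := by
    conv_rhs => rw [← List.takeWhile_append_dropWhile (p := PySem.Chars.isspace) (l := cs)]
    rw [List.length_append]
  have hs0 : pvLoopStart cs cs.length 0 = (cs.takeWhile PySem.Chars.isspace).length := by
    rw [pvLoopStart_eq]; simp
  have htwle : (cs.takeWhile PySem.Chars.isspace).length ≤ cs.length := by omega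
  rw [hs0]
  by_cases hall : cs.all PySem.Chars.isspace = true
  · -- all-whitespace (or empty) text: start runs to len, end stays at len
    have htw : cs.takeWhile PySem.Chars.isspace = cs :=
      List.takeWhile_eq_self_iff.mpr (List.all_eq_true.mp hall)
    have he : pvLoopEnd cs (cs.takeWhile PySem.Chars.isspace).length cs.length = cs.length := by
      rw [pvLoopEnd_eq cs _ cs.length (le_refl _) htwle, htw]
      omega
    have hscan : pvScanB cs 0 (none, none) = (none, none) := by
      refine Prod.ext ?_ ?_
      · rw [pvScanB_fst_none, if_pos hall]
      · rw [pvScanB_snd, if_pos hall]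
    rw [he, hscan]
    simp only [Prod.mk.injEq, htw]
    refine ⟨?_, trivial⟩
    rw [← String.toList_inj, PySem.Str.toList_slice]
    simp only [PySem.Chars.slice_eq_listSlice, PySem.List.slice_natCast]
    simp
  · -- some non-space character exists
    have hall2 : cs.all PySem.Chars.isspace = false := eq_false_of_ne_true hall
    have hd : cs.dropWhile PySem.Chars.isspace ≠ [] := by
      intro h
      have : ∀ x ∈ cs, PySem.Chars.isspace x = true := List.dropWhile_eq_nil_iff.mp h
      exact absurd (List.all_eq_true.mpr this) hall
    have hhead : PySem.Chars.isspace ((cs.dropWhile PySem.Chars.isspace).head hd) = false :=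
      List.head_dropWhile_not PySem.Chars.isspace hd
    have hdall : (cs.dropWhile PySem.Chars.isspace).all PySem.Chars.isspace = false := by
      rw [List.all_eq_false]
      exact ⟨_, List.head_mem hd, by simp [hhead]⟩
    -- trailing-space run of cs equals that of dropWhile cs …
    have hts : cs.reverse.takeWhile PySem.Chars.isspace
        = (cs.dropWhile PySem.Chars.isspace).reverse.takeWhile PySem.Chars.isspace := by
      conv_lhs => rw [← List.takeWhile_append_dropWhile (p := PySem.Chars.isspace) (l := cs)]
      rw [List.reverse_append, List.takeWhile_append,
        if_neg (by have := pvNotAllRevLt _ hdall; simp; omega)]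
    -- … so it never reaches past the first non-space character
    have hbound : (cs.takeWhile PySem.Chars.isspace).length
        + (cs.reverse.takeWhile PySem.Chars.isspace).length < cs.length := by
      have := pvNotAllRevLt _ hdall
      rw [hts]
      omega
    have he : pvLoopEnd cs (cs.takeWhile PySem.Chars.isspace).length cs.length
        = cs.length - (cs.reverse.takeWhile PySem.Chars.isspace).length := by
      rw [pvLoopEnd_eq cs _ cs.length (le_refl _) htwle]
      rw [List.take_length]
      omega
    have hscan : pvScanB cs 0 (none, none)
        = (some (cs.takeWhile PySem.Chars.isspace).length,
           some (cs.length - 1 - (cs.reverse.takeWhile PySem.Chars.isspace).length)) := by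
      refine Prod.ext ?_ ?_
      · rw [pvScanB_fst_none, if_neg hall]; simp
      · rw [pvScanB_snd, if_neg hall]; simp
    rw [he, hscan]
    have hcast : ((cs.length - 1 - (cs.reverse.takeWhile PySem.Chars.isspace).length : Nat) : Int) + 1
        = ((cs.length - (cs.reverse.takeWhile PySem.Chars.isspace).length : Nat) : Int) := by
      omega
    simp only [add_assoc, hcast]

-- ===== VERDICT (by name: the statement is the Claim_ definition above) =====
theorem strip_span_py_spec : Claim_equal_strip_span_py := by
  intro text span _
  unfold Spec_strip_span_py
  exact strip_span_main text span
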